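-- pv_equiv track=rewrite | github.com/dmitry957/codewars-training | kata/7-kyu/will-my-horse-make-it-to-the-end/solution.py | estimator
-- ===== SOURCE A (Python) =====
-- def estimator(obstacles, stamina):
--     obstacle_count = 0
--     for o in obstacles:
--         if o == 1:
--             obstacle_count += 1
--         elif o == 0:
--             stamina -= get_obstacle_penalty(obstacle_count)
--             obstacle_count = 0
--     if obstacle_count > 0:
--         stamina -= get_obstacle_penalty(obstacle_count)
--     return stamina >= 0
--
-- def get_obstacle_penalty(count):
--     return {1: 2, 2: 5, 3: 10}.get(count, 0)
-- ===== SOURCE B (Python) =====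
-- def estimator(obstacles, stamina):
--     # Keep only real track cells (A silently skips any value other than 0/1),
--     # split recursively on hurdles-free cells (0) into maximal runs of 1's,
--     # then charge each run's penalty at once.
--     filtered = [o for o in obstacles if o in (0, 1)]
--     total = sum(get_obstacle_penalty(n) for n in run_lengths(filtered))
--     return stamina - total >= 0
--
-- def run_lengths(xs):
--     if 0 not in xs:
--         return [len(xs)]
--     i = xs.index(0)
--     return [i] + run_lengths(xs[i + 1:])
--
-- def get_obstacle_penalty(count):
--     return {1: 2, 2: 5, 3: 10}.get(count, 0)
-- ===== Notes on version B (the rewrite author's own statement) =====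
-- stated objective: alternative
-- what changed: Instead of A's single pass with a running counter reset at each 0 and a trailing charge, B filters the list to {0,1}, recursively splits it on 0 into maximal runs of 1's via index/slicing, and subtracts the sum of the per-run penalties once.
import Mathlib
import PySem

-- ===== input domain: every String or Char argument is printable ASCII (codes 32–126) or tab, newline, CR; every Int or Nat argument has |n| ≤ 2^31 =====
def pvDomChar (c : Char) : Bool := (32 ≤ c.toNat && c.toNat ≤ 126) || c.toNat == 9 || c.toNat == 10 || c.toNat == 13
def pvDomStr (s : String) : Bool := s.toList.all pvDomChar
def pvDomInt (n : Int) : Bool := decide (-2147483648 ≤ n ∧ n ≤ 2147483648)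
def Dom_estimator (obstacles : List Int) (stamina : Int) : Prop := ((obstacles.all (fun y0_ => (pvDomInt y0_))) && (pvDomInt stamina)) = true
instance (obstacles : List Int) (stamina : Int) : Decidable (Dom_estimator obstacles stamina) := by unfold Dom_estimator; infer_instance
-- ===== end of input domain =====

-- B replaces A's running counter-and-reset loop by a filter to {0,1} plus a recursive
-- split of the track into maximal runs of 1's whose penalties are summed once (objective: alternative decomposition).


-- ===== PORT A =====
-- {1: 2, 2: 5, 3: 10}.get(count, 0)  (helper shared verbatim by both Python files)
def get_obstacle_penalty (count : Int) : Int :=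
  PySem.Dict.getD (PySem.Dict.ofList [((1 : Int), (2 : Int)), (2, 5), (3, 10)]) count 0

def estimator (obstacles : List Int) (stamina : Int) : Bool :=
  let p := obstacles.foldl
    (fun (p : Int × Int) o =>
      if o == 1 then (p.1 + 1, p.2)
      else if o == 0 then (0, p.2 - get_obstacle_penalty p.1)
      else p)
    (0, stamina)
  let st := if p.1 > 0 then p.2 - get_obstacle_penalty p.1 else p.2
  decide (st ≥ 0)

-- ===== PORT B =====
-- run_lengths(xs): split xs on its 0's, recursively, returning the segment lengths
def run_lengths (xs : List Int) : List Int :=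
  match h : PySem.List.index? xs 0 with
  | none => [(xs.length : Int)]                                    -- 0 not in xs
  | some i =>                                                      -- i = xs.index(0)
      (i : Int) :: run_lengths (PySem.List.slice xs (some ((i : Int) + 1)) none)  -- xs[i+1:]
termination_by xs.length
decreasing_by
  have hmem : (0 : Int) ∈ xs := (PySem.List.index?_isSome_iff xs 0).mp (by rw [h]; rfl)
  have hsl : PySem.List.slice xs (some ((i : Int) + 1)) none = xs.drop (i + 1) := by
    have := PySem.List.slice_from_natCast xs (i + 1)
    simpa using this
  rw [hsl]
  have hne : xs ≠ [] := by rintro rfl; simp at hmem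
  have : 0 < xs.length := List.length_pos_of_ne_nil hne
  simp only [List.length_drop]
  omega

def estimator_alt (obstacles : List Int) (stamina : Int) : Bool :=
  let filtered := obstacles.filter (fun o => o == 0 || o == 1)
  let total := ((run_lengths filtered).map get_obstacle_penalty).sum
  decide (stamina - total ≥ 0)

-- ===== PRECONDITION & SPEC =====
def Spec_estimator (obstacles : List Int) (stamina : Int) (out : Bool) : Prop := out = estimator_alt obstacles stamina
instance (obstacles : List Int) (stamina : Int) (out : Bool) : Decidable (Spec_estimator obstacles stamina out) := by unfold Spec_estimator; infer_instance

-- ===== CLAIM (what is proved, stated in full; the proofs are below) =====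
def Claim_equal_estimator : Prop := ∀ (obstacles : List Int) (stamina : Int), Dom_estimator obstacles stamina → Spec_estimator obstacles stamina (estimator obstacles stamina)

-- ===== LEMMAS AND PROOFS =====

-- A's loop body, named for the proofs
def pvStep (p : Int × Int) (o : Int) : Int × Int :=
  if o == 1 then (p.1 + 1, p.2)
  else if o == 0 then (0, p.2 - get_obstacle_penalty p.1)
  else p

theorem pvFold_filter (obstacles : List Int) (p : Int × Int) :
    obstacles.foldl pvStep p = (obstacles.filter (fun o => o == 0 || o == 1)).foldl pvStep p := by
  induction obstacles generalizing p with
  | nil => rfl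
  | cons o t ih =>
      by_cases h1 : o = 1
      · subst h1; simp [List.foldl, ih]
      · by_cases h0 : o = 0
        · subst h0; simp [List.foldl, ih]
        · simp [List.foldl, pvStep, h0, h1, ih]

theorem pvFold_ones (xs : List Int) (h : ∀ x ∈ xs, x = 1) (c st : Int) :
    xs.foldl pvStep (c, st) = (c + xs.length, st) := by
  induction xs generalizing c with
  | nil => simp
  | cons o t ih =>
      have ho : o = 1 := h o (by simp)
      subst ho
      have := ih (fun x hx => h x (by simp [hx])) (c + 1)
      simp [List.foldl, pvStep, this]
      ring

theorem pvFold_fst_nonneg (xs : List Int) (c st : Int) (hc : 0 ≤ c) :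
    0 ≤ (xs.foldl pvStep (c, st)).1 := by
  induction xs generalizing c st with
  | nil => simpa
  | cons o t ih =>
      simp only [List.foldl]
      by_cases h1 : o = 1
      · rw [show pvStep (c, st) o = (c + 1, st) from by simp [pvStep, h1]]
        exact ih (c + 1) st (by omega)
      · by_cases h0 : o = 0
        · rw [show pvStep (c, st) o = (0, st - get_obstacle_penalty c) from by
            simp [pvStep, h0]]
          exact ih 0 _ le_rfl
        · rw [show pvStep (c, st) o = (c, st) from by simp [pvStep, h0, h1]]
          exact ih c st hc

theorem pvPenalty_zero : get_obstacle_penalty 0 = 0 := by decide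

-- Core: A's loop started with counter 0, over a 0/1 list, final-charged, equals B's per-run sum.
theorem pvCore (xs : List Int) (h01 : ∀ x ∈ xs, x = 0 ∨ x = 1) (st : Int) :
    (xs.foldl pvStep (0, st)).2 - get_obstacle_penalty (xs.foldl pvStep (0, st)).1
      = st - ((run_lengths xs).map get_obstacle_penalty).sum := by
  induction hn : xs.length using Nat.strong_induction_on generalizing xs st with
  | _ n ih =>
  match hidx : PySem.List.index? xs 0 with
  | none =>
      have hnot : (0 : Int) ∉ xs := (PySem.List.index?_eq_none_iff xs 0).mp hidx
      have hall : ∀ x ∈ xs, x = 1 := by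
        intro x hx
        rcases h01 x hx with h | h
        · exact absurd (h ▸ hx) hnot
        · exact h
      rw [pvFold_ones xs hall 0 st]
      have hrl : run_lengths xs = [(xs.length : Int)] := by
        rw [run_lengths.eq_def]
        split
        · rfl
        · next i' heq => rw [hidx] at heq; cases heq
      rw [hrl]
      simp
  | some i =>
      obtain ⟨pre, suf, hsplit, hlen, hnotpre⟩ := (PySem.List.index?_eq_some_iff xs 0 i).mp hidx
      have hpre1 : ∀ x ∈ pre, x = 1 := by
        intro x hx
        rcases h01 x (by simp [hsplit, hx]) with h | h
        · exact absurd (h ▸ hx) hnotpre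
        · exact h
      have hdrop : PySem.List.slice xs (some ((i : Int) + 1)) none = suf := by
        have := PySem.List.slice_from_natCast xs (i + 1)
        have h2 : xs.drop (i + 1) = suf := by
          subst hsplit; rw [← hlen]
          simp
        simpa [h2] using this
      have hfold : xs.foldl pvStep (0, st)
          = suf.foldl pvStep (0, st - get_obstacle_penalty (i : Int)) := by
        subst hsplit
        rw [List.foldl_append, pvFold_ones pre hpre1 0 st]
        simp [List.foldl, pvStep, hlen]
      have hsuf01 : ∀ x ∈ suf, x = 0 ∨ x = 1 := fun x hx => h01 x (by simp [hsplit, hx])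
      have hsuflen : suf.length < n := by
        subst hsplit; simp at hn; omega
      have := ih suf.length hsuflen suf hsuf01 (st - get_obstacle_penalty (i : Int)) rfl
      have hrl : run_lengths xs = (i : Int) :: run_lengths suf := by
        rw [run_lengths.eq_def]
        split
        · next heq => rw [hidx] at heq; cases heq
        · next i' heq =>
            rw [hidx] at heq
            injection heq with heq'
            subst heq'
            rw [hdrop]
      rw [hfold, this, hrl]
      simp
      ring

-- ===== VERDICT (by name: the statement is the Claim_ definition above) =====
theorem estimator_spec : Claim_equal_estimator := by
  intro obstacles stamina _
  show estimator obstacles stamina = estimator_alt obstacles stamina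
  have h01 : ∀ x ∈ obstacles.filter (fun o => o == 0 || o == 1), x = 0 ∨ x = 1 := by
    intro x hx
    rw [List.mem_filter] at hx
    rcases hx with ⟨_, hp⟩
    simp at hp
    tauto
  have hkey := pvCore (obstacles.filter (fun o => o == 0 || o == 1)) h01 stamina
  set f := obstacles.filter (fun o => o == 0 || o == 1) with hf
  have hfin : (if ((f.foldl pvStep (0, stamina)).1 > 0)
        then (f.foldl pvStep (0, stamina)).2 - get_obstacle_penalty (f.foldl pvStep (0, stamina)).1
        else (f.foldl pvStep (0, stamina)).2)
      = (f.foldl pvStep (0, stamina)).2 - get_obstacle_penalty (f.foldl pvStep (0, stamina)).1 := by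
    split_ifs with h
    · rfl
    · have h0 : (f.foldl pvStep (0, stamina)).1 = 0 := by
        have := pvFold_fst_nonneg f 0 stamina le_rfl
        omega
      rw [h0, pvPenalty_zero]; ring
  show decide ((if ((obstacles.foldl pvStep (0, stamina)).1 > 0)
        then (obstacles.foldl pvStep (0, stamina)).2 - get_obstacle_penalty (obstacles.foldl pvStep (0, stamina)).1
        else (obstacles.foldl pvStep (0, stamina)).2) ≥ 0)
      = decide ((stamina - (List.map get_obstacle_penalty (run_lengths f)).sum) ≥ 0)
  rw [pvFold_filter obstacles (0, stamina), ← hf, hfin, hkey]
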